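-- pv_equiv track=rewrite | github.com/Alexendre-Akvize/audioprecc | test_parsing.py | get_db_field
-- ===== SOURCE A (Python) =====
-- TYPE_TO_FILE_FIELD_MAP = {
--     'Main': 'trackFile', 'Extended': 'extendedTrackMp3',
--     'Original': 'originalTrackMp3', 'Original Clean': 'originalTrackMp3Clean',
--     'Original Dirty': 'originalTrackMp3Dirty', 'Intro': 'intro',
--     'Instrumental': 'instru', 'Acapella': 'acapella',
--     'Extended Clean': 'extendedTrackMp3Clean', 'Extended Dirty': 'extendedTrackMp3Dirty',
-- }
--
-- def get_db_field(track_type):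
--     if not track_type:
--         return 'trackFile'
--     f = TYPE_TO_FILE_FIELD_MAP.get(track_type)
--     if not f:
--         for k, v in TYPE_TO_FILE_FIELD_MAP.items():
--             if k.lower() == track_type.lower():
--                 f = v
--                 break
--     return f or 'trackFile'
-- ===== SOURCE B (Python) =====
-- TYPE_TO_FILE_FIELD_MAP = {
--     'Main': 'trackFile', 'Extended': 'extendedTrackMp3',
--     'Original': 'originalTrackMp3', 'Original Clean': 'originalTrackMp3Clean',
--     'Original Dirty': 'originalTrackMp3Dirty', 'Intro': 'intro',
--     'Instrumental': 'instru', 'Acapella': 'acapella',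
--     'Extended Clean': 'extendedTrackMp3Clean', 'Extended Dirty': 'extendedTrackMp3Dirty',
-- }
--
-- LOWER_MAP = {k.lower(): v for k, v in TYPE_TO_FILE_FIELD_MAP.items()}
--
-- def get_db_field(track_type):
--     if not track_type:
--         return 'trackFile'
--     return LOWER_MAP.get(track_type.lower()) or 'trackFile'
-- ===== Notes on version B (the rewrite author's own statement) =====
-- stated objective: idiomatic
-- what changed: Replaces the exact-lookup-then-linear-case-insensitive-scan with a case-folded lookup table built once at module scope, so get_db_field is a single dict lookup with no fallback loop.
import Mathlib
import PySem

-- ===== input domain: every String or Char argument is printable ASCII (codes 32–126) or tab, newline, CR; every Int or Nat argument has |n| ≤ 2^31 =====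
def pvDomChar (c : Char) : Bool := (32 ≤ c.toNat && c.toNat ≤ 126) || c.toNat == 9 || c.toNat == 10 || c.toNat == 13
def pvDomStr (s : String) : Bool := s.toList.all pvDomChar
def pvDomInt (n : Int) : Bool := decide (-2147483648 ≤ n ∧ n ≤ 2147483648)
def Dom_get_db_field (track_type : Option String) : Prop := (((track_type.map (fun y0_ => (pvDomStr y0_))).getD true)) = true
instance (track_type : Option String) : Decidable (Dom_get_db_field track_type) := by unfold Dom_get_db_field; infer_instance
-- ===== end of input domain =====

-- B replaces A's exact-lookup-plus-case-insensitive-fallback-scan by one lookup in a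
-- case-folded table built once; idiomatic, same return value everywhere.

-- ===== PORT A =====
def typeToFileFieldMap : PySem.Dict String String := PySem.Dict.ofList
  [("Main", "trackFile"), ("Extended", "extendedTrackMp3"),
   ("Original", "originalTrackMp3"), ("Original Clean", "originalTrackMp3Clean"),
   ("Original Dirty", "originalTrackMp3Dirty"), ("Intro", "intro"),
   ("Instrumental", "instru"), ("Acapella", "acapella"),
   ("Extended Clean", "extendedTrackMp3Clean"), ("Extended Dirty", "extendedTrackMp3Dirty")]

-- the 'for k, v in …: if k.lower() == track_type.lower(): f = v; break' fallback loop
def pvScanLower (items : List (String × String)) (s : String) : Option String :=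
  match items with
  | [] => none
  | (k, v) :: rest =>
      if PySem.Str.lower k == PySem.Str.lower s then some v else pvScanLower rest s

def get_db_field (track_type : Option String) : String :=
  match track_type with
  | none => "trackFile"                 -- 'if not track_type' (None is falsy)
  | some s =>
      if s == "" then "trackFile"       -- 'if not track_type' ('' is falsy)
      else
        let f := typeToFileFieldMap.get? s
        let f := if f.getD "" == "" then pvScanLower typeToFileFieldMap.items s else f
        -- 'return f or "trackFile"' (None and '' are falsy)
        if f.getD "" == "" then "trackFile" else f.getD ""

-- ===== PORT B =====
-- LOWER_MAP = {k.lower(): v for k, v in TYPE_TO_FILE_FIELD_MAP.items()}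
def lowerMap : PySem.Dict String String :=
  PySem.Dict.ofList (typeToFileFieldMap.items.map (fun kv => (PySem.Str.lower kv.1, kv.2)))

def get_db_field_alt (track_type : Option String) : String :=
  match track_type with
  | none => "trackFile"
  | some s =>
      if s == "" then "trackFile"
      else
        -- 'return LOWER_MAP.get(track_type.lower()) or "trackFile"'
        let r := lowerMap.get? (PySem.Str.lower s)
        if r.getD "" == "" then "trackFile" else r.getD ""

-- ===== PRECONDITION & SPEC =====
def Spec_get_db_field (track_type : Option String) (out : String) : Prop := out = get_db_field_alt track_type
instance (track_type : Option String) (out : String) : Decidable (Spec_get_db_field track_type out) := by unfold Spec_get_db_field; infer_instance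

-- ===== CLAIM (what is proved, stated in full; the proofs are below) =====
def Claim_equal_get_db_field : Prop := ∀ (track_type : Option String), Dom_get_db_field track_type → Spec_get_db_field track_type (get_db_field track_type)

-- ===== LEMMAS AND PROOFS =====

theorem get_db_field_some (s : String) :
    get_db_field (some s) = get_db_field_alt (some s) := by
  by_cases h1 : s = "Main"; · subst h1; rfl
  by_cases h2 : s = "Extended"; · subst h2; rfl
  by_cases h3 : s = "Original"; · subst h3; rfl
  by_cases h4 : s = "Original Clean"; · subst h4; rfl
  by_cases h5 : s = "Original Dirty"; · subst h5; rfl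
  by_cases h6 : s = "Intro"; · subst h6; rfl
  by_cases h7 : s = "Instrumental"; · subst h7; rfl
  by_cases h8 : s = "Acapella"; · subst h8; rfl
  by_cases h9 : s = "Extended Clean"; · subst h9; rfl
  by_cases h10 : s = "Extended Dirty"; · subst h10; rfl
  -- all exact lookups miss: both sides are the same chain of case-folded comparisons
  have hA : typeToFileFieldMap = PySem.Dict.mk
      [("Main", "trackFile"), ("Extended", "extendedTrackMp3"),
       ("Original", "originalTrackMp3"), ("Original Clean", "originalTrackMp3Clean"),
       ("Original Dirty", "originalTrackMp3Dirty"), ("Intro", "intro"),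
       ("Instrumental", "instru"), ("Acapella", "acapella"),
       ("Extended Clean", "extendedTrackMp3Clean"), ("Extended Dirty", "extendedTrackMp3Dirty")] := by rfl
  have hB : lowerMap = PySem.Dict.mk
      [("main", "trackFile"), ("extended", "extendedTrackMp3"),
       ("original", "originalTrackMp3"), ("original clean", "originalTrackMp3Clean"),
       ("original dirty", "originalTrackMp3Dirty"), ("intro", "intro"),
       ("instrumental", "instru"), ("acapella", "acapella"),
       ("extended clean", "extendedTrackMp3Clean"), ("extended dirty", "extendedTrackMp3Dirty")] := by rfl
  have l1 : PySem.Str.lower "Main" = "main" := by rfl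
  have l2 : PySem.Str.lower "Extended" = "extended" := by rfl
  have l3 : PySem.Str.lower "Original" = "original" := by rfl
  have l4 : PySem.Str.lower "Original Clean" = "original clean" := by rfl
  have l5 : PySem.Str.lower "Original Dirty" = "original dirty" := by rfl
  have l6 : PySem.Str.lower "Intro" = "intro" := by rfl
  have l7 : PySem.Str.lower "Instrumental" = "instrumental" := by rfl
  have l8 : PySem.Str.lower "Acapella" = "acapella" := by rfl
  have l9 : PySem.Str.lower "Extended Clean" = "extended clean" := by rfl
  have l10 : PySem.Str.lower "Extended Dirty" = "extended dirty" := by rfl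
  rw [get_db_field, get_db_field_alt, hA, hB]
  simp only [pvScanLower, PySem.Dict.get?_mk_cons,
    l1, l2, l3, l4, l5, l6, l7, l8, l9, l10, beq_iff_eq]
  simp [Ne.symm h1, Ne.symm h2, Ne.symm h3, Ne.symm h4, Ne.symm h5, Ne.symm h6,
        Ne.symm h7, Ne.symm h8, Ne.symm h9, Ne.symm h10, PySem.Dict.get?]

-- ===== VERDICT (by name: the statement is the Claim_ definition above) =====
theorem get_db_field_spec : Claim_equal_get_db_field := by
  intro track_type _
  unfold Spec_get_db_field
  cases track_type with
  | none => rfl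
  | some s => exact get_db_field_some s
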